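-- pv_equiv track=rewrite | github.com/MLaaS-idfCts/Sefaria-Project | ML/scripts/classes_new.py | _get_ref_features
-- ===== SOURCE A (Python) =====
-- def _get_ref_features(input_string):
--     """
--     Given a string, produce the substring that lies
--     after the last comma (if any) but
--     before the numbers at the end (if any).
--     """
--     result = input_string # init
--
--     # get rid of everything before last comma
--     last_comma = input_string.rfind(', ')
--     if last_comma != -1:
--         result = input_string[last_comma + 2:]
--
--     # keep only letters and spaces
--     result = ''.join(char for char in result if char.isalpha() or char == ' ')
--
--     # remove single chars
--     result = ' '.join( [w for w in result.split() if len(w)>1] )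
--
--     return result
-- ===== SOURCE B (Python) =====
-- def _get_ref_features(input_string):
--     # Single left-to-right scan: slice after the last ', ', then collect maximal
--     # letter runs (non-letter chars other than ' ' are skipped, merging runs;
--     # ' ' ends a run), keeping only runs longer than one char.
--     last_comma = input_string.rfind(', ')
--     s = input_string[last_comma + 2:] if last_comma != -1 else input_string
--     tokens = []
--     buf = []
--     for ch in s:
--         if ch.isalpha():
--             buf.append(ch)
--         elif ch == ' ':
--             if len(buf) > 1:
--                 tokens.append(''.join(buf))
--             buf = []
--     if len(buf) > 1:
--         tokens.append(''.join(buf))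
--     return ' '.join(tokens)
-- ===== Notes on version B (the rewrite author's own statement) =====
-- stated objective: alternative
-- what changed: Replaces A's three passes over the sliced string (character filter via join, whitespace split, length-filtered rejoin) with a single left-to-right scan that keeps a current-word buffer, skipping deleted characters so adjacent letter runs merge, flushing the buffer at each space, and keeping only tokens longer than one character.
import Mathlib
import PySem

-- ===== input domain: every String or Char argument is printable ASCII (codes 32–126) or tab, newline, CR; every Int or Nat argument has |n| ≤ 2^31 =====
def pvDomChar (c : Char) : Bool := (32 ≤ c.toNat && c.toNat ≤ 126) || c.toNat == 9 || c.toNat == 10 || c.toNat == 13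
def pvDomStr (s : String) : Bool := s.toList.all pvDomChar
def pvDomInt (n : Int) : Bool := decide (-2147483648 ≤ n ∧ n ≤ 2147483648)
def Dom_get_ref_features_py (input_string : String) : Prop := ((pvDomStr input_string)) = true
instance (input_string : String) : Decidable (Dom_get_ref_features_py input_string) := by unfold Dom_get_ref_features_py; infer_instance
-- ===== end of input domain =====

-- B replaces A's three passes (char filter, split, length filter + join) by one
-- left-to-right scan with a current-word buffer (objective: alternative decomposition, same cost).

-- ===== PORT A =====
def get_ref_features_py (input_string : String) : String :=
  let result := input_string
  let last_comma := PySem.Str.rfind input_string ", "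
  let result := if last_comma ≠ -1 then PySem.Str.slice input_string (some (last_comma + 2)) none else result
  -- ''.join(char for char in result if char.isalpha() or char == ' ')
  let result := String.ofList (result.toList.filter (fun ch => PySem.Chars.isalpha ch || ch == ' '))
  -- ' '.join([w for w in result.split() if len(w) > 1])
  let result := PySem.Str.join " " ((PySem.Str.split₀ result).filter (fun w => PySem.Str.len w > 1))
  result

-- ===== PORT B =====
-- tokens.append(''.join(buf)) if len(buf) > 1
def altFlush (tokens : List String) (buf : List Char) : List String :=
  if buf.length > 1 then tokens ++ [String.ofList buf] else tokens

-- the for-loop over the sliced string, with its two accumulators (tokens, buf)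
def altScan : List Char → List String → List Char → List String
  | [], tokens, buf => altFlush tokens buf
  | ch :: rest, tokens, buf =>
    if PySem.Chars.isalpha ch then altScan rest tokens (buf ++ [ch])
    else if ch == ' ' then altScan rest (altFlush tokens buf) []
    else altScan rest tokens buf

def get_ref_features_py_alt (input_string : String) : String :=
  let last_comma := PySem.Str.rfind input_string ", "
  let s := if last_comma ≠ -1 then PySem.Str.slice input_string (some (last_comma + 2)) none else input_string
  PySem.Str.join " " (altScan s.toList [] [])

-- ===== PRECONDITION & SPEC =====
def Spec_get_ref_features_py (input_string : String) (out : String) : Prop := out = get_ref_features_py_alt input_string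
instance (input_string : String) (out : String) : Decidable (Spec_get_ref_features_py input_string out) := by unfold Spec_get_ref_features_py; infer_instance

-- ===== CLAIM (what is proved, stated in full; the proofs are below) =====
def Claim_equal_get_ref_features_py : Prop := ∀ (input_string : String), Dom_get_ref_features_py input_string → Spec_get_ref_features_py input_string (get_ref_features_py input_string)

-- ===== LEMMAS AND PROOFS =====

-- the character class A's filter keeps
def pvKeep (c : Char) : Bool := PySem.Chars.isalpha c || c == ' '

theorem alpha_codes {c : Char} (h : PySem.Chars.isalpha c = true) :
    65 ≤ c.toNat ∧ c.toNat ≤ 122 := by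
  simp only [PySem.Chars.isalpha, PySem.Chars.isupper, PySem.Chars.islower, Char.le_def,
    UInt32.le_iff_toNat_le, Bool.or_eq_true, Bool.and_eq_true, decide_eq_true_eq] at h
  have hv : ('A').val.toNat = 65 ∧ ('Z').val.toNat = 90 ∧ ('a').val.toNat = 97 ∧
      ('z').val.toNat = 122 := by decide
  obtain ⟨h1, h2, h3, h4⟩ := hv
  simp only [Char.toNat]
  omega

theorem alpha_isspace {c : Char} (h : PySem.Chars.isalpha c = true) :
    PySem.Chars.isspace c = false := by
  have hc := alpha_codes h
  simp only [PySem.Chars.isspace, Bool.or_eq_false_iff, Bool.and_eq_false_iff,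
    decide_eq_false_iff_not]
  omega

theorem alpha_ne_space {c : Char} (h : PySem.Chars.isalpha c = true) :
    (c == ' ') = false := by
  have hc := alpha_codes h
  have : c ≠ ' ' := by
    intro e; subst e; simp [Char.toNat] at hc
  simp [this]

theorem pvKeep_isspace {c : Char} (h : pvKeep c = true) :
    PySem.Chars.isspace c = (c == ' ') := by
  simp only [pvKeep, Bool.or_eq_true] at h
  rcases h with h | h
  · rw [alpha_isspace h, alpha_ne_space h]
  · rw [beq_iff_eq] at h; subst h; decide

theorem altScan_filter (cs : List Char) (toks : List String) (buf : List Char) :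
    altScan cs toks buf = altScan (cs.filter pvKeep) toks buf := by
  induction cs generalizing toks buf with
  | nil => rfl
  | cons c rest ih =>
    by_cases ha : PySem.Chars.isalpha c = true
    · have hk : pvKeep c = true := by simp [pvKeep, ha]
      simp [altScan, hk, ha, ih]
    · by_cases hs : (c == ' ') = true
      · have hk : pvKeep c = true := by simp [pvKeep, hs]
        simp [altScan, hk, ha, hs, ih]
      · have hk : pvKeep c = false := by
          simp [pvKeep]; exact ⟨by simpa using ha, by simpa using hs⟩
        simp [altScan, hk, ha, hs, ih]

theorem split₀_go_acc (ds : List Char) (cur : List Char) (acc : List (List Char)) :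
    PySem.Chars.split₀.go ds cur acc = acc.reverse ++ PySem.Chars.split₀.go ds cur [] := by
  induction ds generalizing cur acc with
  | nil => simp [PySem.Chars.split₀.go]; split_ifs <;> simp
  | cons c rest ih =>
    simp only [PySem.Chars.split₀.go]
    split_ifs with h1 h2
    · exact ih [] acc
    · rw [ih, ih ([]) ([cur.reverse])]; simp
    · exact ih (c :: cur) acc

theorem altScan_split (ds : List Char) (toks : List String) (buf : List Char)
    (h : ∀ c ∈ ds, pvKeep c = true) :
    altScan ds toks buf =
      toks ++ ((PySem.Chars.split₀.go ds buf.reverse []).filter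
        (fun w => 1 < w.length)).map String.ofList := by
  induction ds generalizing toks buf with
  | nil =>
    simp only [altScan, altFlush, PySem.Chars.split₀.go]
    by_cases hb : buf = []
    · subst hb; simp
    · by_cases hl : buf.length > 1
      · simp [hb, hl]
      · simp [hb, hl]
  | cons c rest ih =>
    have hk : pvKeep c = true := h c (by simp)
    have hrest : ∀ x ∈ rest, pvKeep x = true := fun x hx => h x (by simp [hx])
    by_cases ha : PySem.Chars.isalpha c = true
    · simp only [altScan, ha, if_true, PySem.Chars.split₀.go, alpha_isspace ha, if_false,
        Bool.false_eq_true]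
      rw [ih _ _ hrest]
      simp
    · have hs : (c == ' ') = true := by
        simp only [pvKeep, Bool.or_eq_true, ha] at hk
        simpa using hk
      have hk' : pvKeep c = true := h c (by simp)
      have hsp : PySem.Chars.isspace c = true := by rw [pvKeep_isspace hk']; exact hs
      simp only [altScan, ha, if_false, hs, if_true, Bool.false_eq_true]
      by_cases hb : buf = []
      · subst hb
        simp only [PySem.Chars.split₀.go, hsp, if_true, List.reverse_nil, List.isEmpty_nil]
        rw [ih _ _ hrest]
        simp [altFlush]
      · have hne : buf.reverse.isEmpty = false := by simp [hb]
        simp only [PySem.Chars.split₀.go, hsp, if_true, hne, Bool.false_eq_true, if_false,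
          List.reverse_reverse]
        rw [split₀_go_acc, ih _ _ hrest]
        simp only [List.reverse_cons, List.reverse_nil, List.nil_append, List.filter_append,
          List.map_append, altFlush]
        by_cases hl : buf.length > 1
        · simp [hl]
        · simp [hl]

theorem key (t : List Char) :
    PySem.Str.join " " ((PySem.Str.split₀ (String.ofList (t.filter pvKeep))).filter
      (fun w => PySem.Str.len w > 1)) = PySem.Str.join " " (altScan t [] []) := by
  rw [altScan_filter, altScan_split _ _ _ (fun c hc => (List.mem_filter.1 hc).2)]
  simp only [PySem.Str.split₀, List.nil_append, List.filter_map]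
  congr 1
  have ht : (String.ofList (t.filter pvKeep)).toList = t.filter pvKeep := by
    simp
  rw [ht]
  unfold PySem.Chars.split₀
  simp only [List.reverse_nil]
  congr 1
  apply List.filter_congr
  intro w hw
  simp [PySem.Str.len]

-- ===== VERDICT (by name: the statement is the Claim_ definition above) =====
theorem get_ref_features_py_spec : Claim_equal_get_ref_features_py := by
  intro input_string _
  unfold Spec_get_ref_features_py get_ref_features_py get_ref_features_py_alt
  exact key _
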